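-- pv_equiv track=rewrite | github.com/haveyouwantto/mcws | message_utils.py | drawKeyboard
-- ===== SOURCE A (Python) =====
-- def drawKeyboard(key, start=0):
--     out = ""
--     i = start
--     while i < key:
--         if (i % 12 == 1 or i % 12 == 3 or i % 12 == 6 or i % 12 == 8 or i % 12 == 10):
--             out += "\u00a70\u258F"
--         else:
--             out += "\u00a7f\u258F"
--         i += 1
--     return out
-- ===== SOURCE B (Python) =====
-- _BLACK = {1, 3, 6, 8, 10}
-- _BLOCK = "".join("\u00a70\u258F" if c in _BLACK else "\u00a7f\u258F" for c in range(12))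
--
-- def drawKeyboard(key, start=0):
--     n = key - start
--     if n <= 0:
--         return ""
--     phase = start % 12
--     reps = (phase + n + 11) // 12
--     s = _BLOCK * reps
--     return s[3 * phase : 3 * (phase + n)]
-- ===== Notes on version B (the rewrite author's own statement) =====
-- stated objective: alternative
-- what changed: Replaces A's per-key while-loop with its modulo-12 branch by a precomputed 12-marker period block that is tiled (string repetition) and sliced to the window [3*phase, 3*(phase+n)).
import Mathlib
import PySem

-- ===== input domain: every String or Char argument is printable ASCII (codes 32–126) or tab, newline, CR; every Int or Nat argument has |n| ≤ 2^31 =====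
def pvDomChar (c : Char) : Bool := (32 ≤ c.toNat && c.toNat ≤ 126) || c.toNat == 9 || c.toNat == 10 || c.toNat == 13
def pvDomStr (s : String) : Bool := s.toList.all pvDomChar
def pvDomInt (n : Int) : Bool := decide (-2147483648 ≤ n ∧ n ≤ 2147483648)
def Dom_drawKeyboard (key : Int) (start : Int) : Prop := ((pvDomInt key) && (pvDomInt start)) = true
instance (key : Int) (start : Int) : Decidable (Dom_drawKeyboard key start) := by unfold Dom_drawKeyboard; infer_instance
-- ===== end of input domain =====

-- B replaces A's per-key while-loop with a closed-form tile-and-slice of a precomputed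
-- 12-marker period block (objective: alternative decomposition, same exact output).

-- ===== PORT A =====
-- literal port of A's while-loop: structural recursion on the remaining distance key - i
def drawKeyboard.loop (key : Int) (i : Int) (out : String) : String :=
  if i < key then
    drawKeyboard.loop key (i + 1)
      (out ++ (if PySem.Int.mod i 12 == 1 || PySem.Int.mod i 12 == 3 || PySem.Int.mod i 12 == 6
                  || PySem.Int.mod i 12 == 8 || PySem.Int.mod i 12 == 10
               then "\u00a70\u258F" else "\u00a7f\u258F"))
  else out
termination_by (key - i).toNat
decreasing_by omega

def drawKeyboard (key : Int) (start : Int) : String :=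
  drawKeyboard.loop key start ""

-- ===== PORT B =====
-- _BLOCK: the concatenated markers for pitch classes 0..11 ("c in _BLACK" ported as list membership)
def pvBlock : String :=
  String.ofList ((List.range 12).flatMap
    (fun c => if (c : Int) ∈ ([1, 3, 6, 8, 10] : List Int)
              then "\u00a70\u258F".toList else "\u00a7f\u258F".toList))

def drawKeyboard_alt (key : Int) (start : Int) : String :=
  let n := key - start
  if n ≤ 0 then ""
  else
    let phase := PySem.Int.mod start 12
    let reps := PySem.Int.floordiv (phase + n + 11) 12
    -- _BLOCK * reps  (string repetition; a non-positive count would give "")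
    let s : List Char := (List.replicate reps.toNat pvBlock.toList).flatten
    String.ofList (PySem.List.slice s (some (3 * phase)) (some (3 * (phase + n))))

-- ===== PRECONDITION & SPEC =====
def Spec_drawKeyboard (key : Int) (start : Int) (out : String) : Prop := out = drawKeyboard_alt key start
instance (key : Int) (start : Int) (out : String) : Decidable (Spec_drawKeyboard key start out) := by unfold Spec_drawKeyboard; infer_instance

-- ===== CLAIM (what is proved, stated in full; the proofs are below) =====
def Claim_equal_drawKeyboard : Prop := ∀ (key : Int) (start : Int), Dom_drawKeyboard key start → Spec_drawKeyboard key start (drawKeyboard key start)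

-- ===== LEMMAS AND PROOFS =====

-- the 3-char marker for an integer key i, exactly as A appends it
def pvMI (i : Int) : List Char :=
  if PySem.Int.mod i 12 == 1 || PySem.Int.mod i 12 == 3 || PySem.Int.mod i 12 == 6
      || PySem.Int.mod i 12 == 8 || PySem.Int.mod i 12 == 10
  then "\u00a70\u258F".toList else "\u00a7f\u258F".toList

-- the 3-char marker for a natural counter, reduced mod 12
def pvM (c : Nat) : List Char :=
  if c % 12 = 1 ∨ c % 12 = 3 ∨ c % 12 = 6 ∨ c % 12 = 8 ∨ c % 12 = 10
  then "\u00a70\u258F".toList else "\u00a7f\u258F".toList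

theorem pvM_length (c : Nat) : (pvM c).length = 3 := by
  unfold pvM; split <;> rfl

theorem pvM_add12 (c : Nat) : pvM (12 + c) = pvM c := by
  unfold pvM; rw [Nat.add_mod_left]

-- A's loop appends the markers of start, start+1, …, key-1
theorem loopA_eq (n : Nat) : ∀ (key i : Int) (out : String), (key - i).toNat = n →
    drawKeyboard.loop key i out
      = out ++ String.ofList ((List.range n).flatMap (fun (j : Nat) => pvMI (i + (j : Int)))) := by
  induction n with
  | zero =>
    intro key i out h
    unfold drawKeyboard.loop
    rw [if_neg (by omega)]
    simp
  | succ n ih =>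
    intro key i out h
    unfold drawKeyboard.loop
    rw [if_pos (by omega)]
    rw [ih key (i + 1) _ (by omega)]
    rw [List.range_succ_eq_map]
    have hS : (if PySem.Int.mod i 12 == 1 || PySem.Int.mod i 12 == 3 || PySem.Int.mod i 12 == 6
                  || PySem.Int.mod i 12 == 8 || PySem.Int.mod i 12 == 10
               then ("\u00a70\u258F" : String) else "\u00a7f\u258F") = String.ofList (pvMI i) := by
      unfold pvMI; split <;> rfl
    rw [hS]
    simp only [List.flatMap_cons, List.flatMap_map]
    simp [String.append_assoc, ← String.ofList_append]
    congr 1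
    congr 1
    apply List.flatMap_congr
    intro a _
    congr 1
    ring

-- the period block is the markers of classes 0..11
theorem pvBlock_eq : pvBlock.toList = (List.range 12).flatMap pvM := by decide

-- r copies of the block are the markers of 0..12r-1
theorem flatten_replicate_block (r : Nat) :
    (List.replicate r pvBlock.toList).flatten
      = (List.range (12 * r)).flatMap pvM := by
  induction r with
  | zero => simp
  | succ r ih =>
    rw [List.replicate_succ, List.flatten_cons, ih, pvBlock_eq]
    have h12 : 12 * (r + 1) = 12 + 12 * r := by ring
    rw [h12, List.range_add, List.flatMap_append, List.flatMap_map]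
    congr 1
    apply List.flatMap_congr
    intro j _
    exact (pvM_add12 j).symm

-- dropping 3p chars of a flatMap of 3-char chunks drops p chunks
theorem drop3_flatMap (f : Nat → List Char) (hf : ∀ c, (f c).length = 3) :
    ∀ (l : List Nat) (p : Nat), (l.flatMap f).drop (3 * p) = (l.drop p).flatMap f := by
  intro l
  induction l with
  | nil => intro p; simp
  | cons a t ih =>
    intro p
    cases p with
    | zero => simp
    | succ p =>
      rw [List.flatMap_cons, List.drop_append, List.drop_of_length_le (by rw [hf]; omega),
        hf, List.nil_append]
      have : 3 * (p + 1) - 3 = 3 * p := by omega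
      rw [this, ih p, List.drop_succ_cons]

theorem take3_flatMap (f : Nat → List Char) (hf : ∀ c, (f c).length = 3) :
    ∀ (l : List Nat) (n : Nat), (l.flatMap f).take (3 * n) = (l.take n).flatMap f := by
  intro l
  induction l with
  | nil => intro n; simp
  | cons a t ih =>
    intro n
    cases n with
    | zero => simp
    | succ n =>
      rw [List.flatMap_cons, List.take_append, List.take_of_length_le (by rw [hf]; omega),
        hf]
      have : 3 * (n + 1) - 3 = 3 * n := by omega
      rw [this, ih n, List.take_succ_cons, List.flatMap_cons]

-- window [p, p+n) of range m
theorem take_drop_range (m p n : Nat) (h : p + n ≤ m) :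
    ((List.range m).drop p).take n = List.range' p n := by
  apply List.ext_getElem
  · simp [List.length_range']
    omega
  · intro i h1 h2
    simp only [List.getElem_take, List.getElem_drop, List.getElem_range, List.getElem_range']
    omega

-- A's marker at start+j equals the class marker at phase+j
theorem pvMI_eq_pvM (start : Int) (j : Nat) :
    pvMI (start + (j : Int)) = pvM ((PySem.Int.mod start 12).toNat + j) := by
  have h12 : (0 : Int) < 12 := by norm_num
  have hm := PySem.Int.mod_eq_emod_of_pos (a := start) (b := 12) h12
  have hm2 := PySem.Int.mod_eq_emod_of_pos (a := start + (j : Int)) (b := 12) h12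
  set p : Nat := (PySem.Int.mod start 12).toNat with hp
  have hpi : (p : Int) = start % 12 := by
    have hnn : 0 ≤ start % 12 := Int.emod_nonneg _ (by norm_num)
    rw [hp, hm]; omega
  have key : (start + (j : Int)) % 12 = (((p + j) % 12 : Nat) : Int) := by omega
  unfold pvMI pvM
  rw [hm2, key]
  have hlt2 : (p + j) % 12 < 12 := Nat.mod_lt _ (by norm_num)
  interval_cases h : (p + j) % 12 <;> simp

-- ===== VERDICT (by name: the statement is the Claim_ definition above) =====
theorem drawKeyboard_spec : Claim_equal_drawKeyboard := by
  unfold Claim_equal_drawKeyboard Spec_drawKeyboard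
  intro key start _
  unfold drawKeyboard drawKeyboard_alt
  by_cases hle : key - start ≤ 0
  · rw [if_pos hle]
    unfold drawKeyboard.loop
    rw [if_neg (by omega)]
  · rw [if_neg hle]
    set n : Nat := (key - start).toNat with hn
    have hn1 : 1 ≤ n := by omega
    rw [loopA_eq n key start "" rfl]
    rw [String.empty_append]
    congr 1
    -- rewrite A's list via pvM
    have hA : (List.range n).flatMap (fun (j : Nat) => pvMI (start + (j : Int)))
        = (List.range n).flatMap (fun (j : Nat) => pvM ((PySem.Int.mod start 12).toNat + j)) := by
      apply List.flatMap_congr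
      intro j _
      exact pvMI_eq_pvM start j
    rw [hA]
    -- B side
    have h12 : (0 : Int) < 12 := by norm_num
    have hnn : 0 ≤ PySem.Int.mod start 12 := by
      rw [PySem.Int.mod_eq_emod_of_pos h12]; exact Int.emod_nonneg _ (by norm_num)
    have hlt : PySem.Int.mod start 12 < 12 := by
      rw [PySem.Int.mod_eq_emod_of_pos h12]; exact Int.emod_lt_of_pos _ h12
    set pI : Int := PySem.Int.mod start 12 with hpI
    set p : Nat := pI.toNat with hp
    have hpic : (p : Int) = pI := by omega
    have hrepsI : PySem.Int.floordiv (pI + (key - start) + 11) 12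
        = (((p + n + 11) / 12 : Nat) : Int) := by
      rw [PySem.Int.floordiv_eq_ediv_of_pos h12]; omega
    set r : Nat := (p + n + 11) / 12 with hr
    have hrt : (PySem.Int.floordiv (pI + (key - start) + 11) 12).toNat = r := by
      rw [hrepsI]; omega
    have hm : p + n ≤ 12 * r := by omega
    rw [hrt, flatten_replicate_block r]
    have h3p : (0:Int) ≤ 3 * pI := by positivity
    have h3pn : (0:Int) ≤ 3 * (pI + (key - start)) := by omega
    rw [PySem.List.slice_toNat _ h3p h3pn]
    have e1 : (3 * pI).toNat = 3 * p := by omega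
    have e2 : (3 * (pI + (key - start))).toNat - 3 * p = 3 * n := by omega
    rw [e1, e2]
    rw [drop3_flatMap pvM pvM_length, take3_flatMap pvM pvM_length]
    rw [take_drop_range (12 * r) p n hm]
    rw [List.range'_eq_map_range, List.flatMap_map]
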